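-- pv_equiv track=rewrite | github.com/PyePB2D8GcFRfS/getnodefromytb | getYoutube.py | setPG
-- ===== SOURCE A (Python) =====
-- def setPG(nodes):
--     # 设置策略组 auto,Fallback-auto,Proxy
--     proxy_names = "proxy-groups:"
--     jiedian = """
--   - name: 🔰 节点选择
--     type: select
--     proxies:
--       - ♻️ 自动选择
--       - 🎯 全球直连
--     """
--     zidong = """
--   - name: ♻️ 自动选择
--     type: url-test
--     url: http://www.gstatic.com/generate_204
--     interval: 300
--     proxies:
--     """
--     guowai = """
--   - name: 🌍 国外媒体
--     type: select
--     proxies: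
--       - 🔰 节点选择
--       - ♻️ 自动选择
--       - 🎯 全球直连
--     """
--     guonei = """
--   - name: 🌏 国内媒体
--     type: select
--     proxies:
--       - 🎯 全球直连
--       - 🔰 节点选择
--     """
--     weiruan = """
--   - name: Ⓜ️ 微软服务
--     type: select
--     proxies:
--       - 🎯 全球直连
--       - 🔰 节点选择
--     """
--     dianbao = """
--   - name: 📲 电报信息
--     type: select
--     proxies:
--       - 🔰 节点选择
--       - 🎯 全球直连
--     """
--
--     apple = """
--   - name: 🍎 苹果服务
--     type: select
--     proxies:
--       - 🔰 节点选择
--       - 🎯 全球直连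
--       - ♻️ 自动选择
--     """
--     direct = """
--   - name: 🎯 全球直连
--     type: select
--     proxies:
--       - DIRECT
--     """
--     quanqiulanjie = """
--   - name: 🛑 全球拦截
--     type: select
--     proxies:
--       - REJECT
--       - DIRECT
--     """
--     louwang = """
--   - name: 🐟 漏网之鱼
--     type: select
--     proxies:
--       - 🔰 节点选择
--       - 🎯 全球直连
--       - ♻️ 自动选择
--     """
--     groups = [jiedian, zidong, guowai,guonei, weiruan, dianbao, apple, direct, quanqiulanjie, louwang]
--     for p in groups:
--         proxy_names = proxy_names + p
--         for idx, node in enumerate(nodes):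
--             if(idx == 0):
--                 proxy_names = proxy_names + "  - " +str(idx) + "@" + str(idx) +  "\n"
--             else:
--                 proxy_names = proxy_names + "      - " + str(idx) + "@" + str(idx)  +  "\n"
--                 if(idx == len(nodes)-1):
--                     proxy_names = proxy_names[:-1]
--
--     return proxy_names
-- ===== SOURCE B (Python) =====
-- def setPG(nodes):
--     # 设置策略组 auto,Fallback-auto,Proxy
--     jiedian = """
--   - name: 🔰 节点选择
--     type: select
--     proxies:
--       - ♻️ 自动选择
--       - 🎯 全球直连
--     """
--     zidong = """
--   - name: ♻️ 自动选择
--     type: url-test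
--     url: http://www.gstatic.com/generate_204
--     interval: 300
--     proxies:
--     """
--     guowai = """
--   - name: 🌍 国外媒体
--     type: select
--     proxies:
--       - 🔰 节点选择
--       - ♻️ 自动选择
--       - 🎯 全球直连
--     """
--     guonei = """
--   - name: 🌏 国内媒体
--     type: select
--     proxies:
--       - 🎯 全球直连
--       - 🔰 节点选择
--     """
--     weiruan = """
--   - name: Ⓜ️ 微软服务
--     type: select
--     proxies:
--       - 🎯 全球直连
--       - 🔰 节点选择
--     """
--     dianbao = """
--   - name: 📲 电报信息
--     type: select
--     proxies:
--       - 🔰 节点选择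
--       - 🎯 全球直连
--     """
--
--     apple = """
--   - name: 🍎 苹果服务
--     type: select
--     proxies:
--       - 🔰 节点选择
--       - 🎯 全球直连
--       - ♻️ 自动选择
--     """
--     direct = """
--   - name: 🎯 全球直连
--     type: select
--     proxies:
--       - DIRECT
--     """
--     quanqiulanjie = """
--   - name: 🛑 全球拦截
--     type: select
--     proxies:
--       - REJECT
--       - DIRECT
--     """
--     louwang = """
--   - name: 🐟 漏网之鱼
--     type: select
--     proxies:
--       - 🔰 节点选择
--       - 🎯 全球直连
--       - ♻️ 自动选择
--     """
--     groups = [jiedian, zidong, guowai, guonei, weiruan, dianbao, apple, direct, quanqiulanjie, louwang]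
--     # the per-group node block depends only on len(nodes): build it once
--     n = len(nodes)
--     if n == 0:
--         block = ""
--     else:
--         block = "  - 0@0\n" + "\n".join("      - %d@%d" % (i, i) for i in range(1, n))
--     return "proxy-groups:" + "".join(g + block for g in groups)
-- ===== Notes on version B (the rewrite author's own statement) =====
-- stated objective: simpler
-- what changed: The per-node block, which depends only on the node count, is hoisted out of the group loop and built once (first line plus a newline-join of the indented lines, which makes the last-line newline-strip disappear); the result is then the ten headers each concatenated with that one precomputed block via join.
import Mathlib
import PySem

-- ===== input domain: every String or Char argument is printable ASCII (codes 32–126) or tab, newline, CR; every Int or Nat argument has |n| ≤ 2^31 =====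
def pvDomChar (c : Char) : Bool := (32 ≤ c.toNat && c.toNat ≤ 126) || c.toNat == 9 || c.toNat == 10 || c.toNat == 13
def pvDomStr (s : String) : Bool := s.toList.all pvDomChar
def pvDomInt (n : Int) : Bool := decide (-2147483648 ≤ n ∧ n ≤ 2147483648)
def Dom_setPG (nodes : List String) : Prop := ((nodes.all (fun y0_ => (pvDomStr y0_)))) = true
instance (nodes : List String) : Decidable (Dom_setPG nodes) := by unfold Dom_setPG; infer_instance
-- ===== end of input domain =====

-- B hoists the per-node block (which depends only on the node count) out of the group loop,
-- builds it once, and joins the ten group headers with it in one pass: same output by a simpler decomposition.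

-- ===== PORT A =====
def setPG (nodes : List String) : String :=
  let proxy_names := "proxy-groups:"
  let jiedian := "\n  - name: 🔰 节点选择\n    type: select\n    proxies:\n      - ♻️ 自动选择\n      - 🎯 全球直连\n    "
  let zidong := "\n  - name: ♻️ 自动选择\n    type: url-test\n    url: http://www.gstatic.com/generate_204\n    interval: 300\n    proxies:\n    "
  let guowai := "\n  - name: 🌍 国外媒体\n    type: select\n    proxies:\n      - 🔰 节点选择\n      - ♻️ 自动选择\n      - 🎯 全球直连\n    "
  let guonei := "\n  - name: 🌏 国内媒体\n    type: select\n    proxies:\n      - 🎯 全球直连\n      - 🔰 节点选择\n    "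
  let weiruan := "\n  - name: Ⓜ️ 微软服务\n    type: select\n    proxies:\n      - 🎯 全球直连\n      - 🔰 节点选择\n    "
  let dianbao := "\n  - name: 📲 电报信息\n    type: select\n    proxies:\n      - 🔰 节点选择\n      - 🎯 全球直连\n    "
  let apple := "\n  - name: 🍎 苹果服务\n    type: select\n    proxies:\n      - 🔰 节点选择\n      - 🎯 全球直连\n      - ♻️ 自动选择\n    "
  let direct := "\n  - name: 🎯 全球直连\n    type: select\n    proxies:\n      - DIRECT\n    "
  let quanqiulanjie := "\n  - name: 🛑 全球拦截\n    type: select\n    proxies:\n      - REJECT\n      - DIRECT\n    "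
  let louwang := "\n  - name: 🐟 漏网之鱼\n    type: select\n    proxies:\n      - 🔰 节点选择\n      - 🎯 全球直连\n      - ♻️ 自动选择  \n    "
  let groups := [jiedian, zidong, guowai, guonei, weiruan, dianbao, apple, direct, quanqiulanjie, louwang]
  groups.foldl (fun proxy_names p =>
    (PySem.List.enumerate nodes).foldl (fun proxy_names iv =>
      let idx := iv.1
      if idx == 0 then
        proxy_names ++ "  - " ++ PySem.Int.toStr idx ++ "@" ++ PySem.Int.toStr idx ++ "\n"
      else
        let proxy_names := proxy_names ++ "      - " ++ PySem.Int.toStr idx ++ "@" ++ PySem.Int.toStr idx ++ "\n"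
        if idx == (nodes.length : Int) - 1 then PySem.Str.slice proxy_names none (some (-1))
        else proxy_names) (proxy_names ++ p)) proxy_names

-- ===== PORT B =====
def setPG_alt (nodes : List String) : String :=
  let jiedian := "\n  - name: 🔰 节点选择\n    type: select\n    proxies:\n      - ♻️ 自动选择\n      - 🎯 全球直连\n    "
  let zidong := "\n  - name: ♻️ 自动选择\n    type: url-test\n    url: http://www.gstatic.com/generate_204\n    interval: 300\n    proxies:\n    "
  let guowai := "\n  - name: 🌍 国外媒体\n    type: select\n    proxies:\n      - 🔰 节点选择\n      - ♻️ 自动选择\n      - 🎯 全球直连\n    "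
  let guonei := "\n  - name: 🌏 国内媒体\n    type: select\n    proxies:\n      - 🎯 全球直连\n      - 🔰 节点选择\n    "
  let weiruan := "\n  - name: Ⓜ️ 微软服务\n    type: select\n    proxies:\n      - 🎯 全球直连\n      - 🔰 节点选择\n    "
  let dianbao := "\n  - name: 📲 电报信息\n    type: select\n    proxies:\n      - 🔰 节点选择\n      - 🎯 全球直连\n    "
  let apple := "\n  - name: 🍎 苹果服务\n    type: select\n    proxies:\n      - 🔰 节点选择\n      - 🎯 全球直连\n      - ♻️ 自动选择\n    "
  let direct := "\n  - name: 🎯 全球直连\n    type: select\n    proxies:\n      - DIRECT\n    "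
  let quanqiulanjie := "\n  - name: 🛑 全球拦截\n    type: select\n    proxies:\n      - REJECT\n      - DIRECT\n    "
  let louwang := "\n  - name: 🐟 漏网之鱼\n    type: select\n    proxies:\n      - 🔰 节点选择\n      - 🎯 全球直连\n      - ♻️ 自动选择  \n    "
  let groups := [jiedian, zidong, guowai, guonei, weiruan, dianbao, apple, direct, quanqiulanjie, louwang]
  let n := nodes.length
  let block := if n = 0 then "" else
    "  - 0@0\n" ++ PySem.Str.join "\n"
      ((PySem.List.pyRange 1 (n : Int)).map (fun i => "      - " ++ PySem.Int.toStr i ++ "@" ++ PySem.Int.toStr i))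
  "proxy-groups:" ++ PySem.Str.join "" (groups.map (fun g => g ++ block))

-- ===== PRECONDITION & SPEC =====
def Spec_setPG (nodes : List String) (out : String) : Prop := out = setPG_alt nodes
instance (nodes : List String) (out : String) : Decidable (Spec_setPG nodes out) := by unfold Spec_setPG; infer_instance

-- ===== CLAIM (what is proved, stated in full; the proofs are below) =====
def Claim_equal_setPG : Prop := ∀ (nodes : List String), Dom_setPG nodes → Spec_setPG nodes (setPG nodes)

-- ===== LEMMAS AND PROOFS =====

def pgTail (n j : Int) : String :=
  PySem.Str.join "\n" ((PySem.List.pyRange j n).map (fun i => "      - " ++ PySem.Int.toStr i ++ "@" ++ PySem.Int.toStr i))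

lemma pyRange_empty (j n : Int) (h : n ≤ j) : PySem.List.pyRange j n = [] := by
  rw [PySem.List.pyRange_one]
  rw [show (n - j).toNat = 0 by omega]
  simp

lemma pgTail_last (n : Int) : pgTail n (n - 1) = "      - " ++ PySem.Int.toStr (n-1) ++ "@" ++ PySem.Int.toStr (n-1) := by
  unfold pgTail
  rw [PySem.List.pyRange_one_cons (by omega), pyRange_empty _ _ (by omega)]
  apply String.toList_inj.mp
  simp [PySem.Str.join, PySem.Chars.join_singleton]

lemma pgTail_cons (n j : Int) (h : j + 1 < n) :
    pgTail n j = "      - " ++ PySem.Int.toStr j ++ "@" ++ PySem.Int.toStr j ++ "\n" ++ pgTail n (j+1) := by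
  unfold pgTail
  rw [PySem.List.pyRange_one_cons (by omega), PySem.List.pyRange_one_cons (by omega : j + 1 < n)]
  apply String.toList_inj.mp
  simp [PySem.Str.join, PySem.Chars.join_cons_cons]

lemma dropLast_line (A B : List Char) : (' ' :: (A ++ '@' :: (B ++ ['\n']))).dropLast = ' ' :: (A ++ '@' :: B) := by
  rw [show ' ' :: (A ++ '@' :: (B ++ ['\n'])) = (' ' :: (A ++ '@' :: B)) ++ ['\n'] by simp]
  exact List.dropLast_concat ..

-- A's inner (per-node) loop body, as in the port of A
def pgBody (n : Int) (acc : String) (idx : Int) : String :=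
  if idx == 0 then
    acc ++ "  - " ++ PySem.Int.toStr idx ++ "@" ++ PySem.Int.toStr idx ++ "\n"
  else
    let acc := acc ++ "      - " ++ PySem.Int.toStr idx ++ "@" ++ PySem.Int.toStr idx ++ "\n"
    if idx == n - 1 then PySem.Str.slice acc none (some (-1))
    else acc

lemma pgTail_fold (n : Int) : ∀ (m : Nat) (j : Int) (acc : String), 1 ≤ j → j + m = n → 1 ≤ m →
    (PySem.List.pyRange j n).foldl (pgBody n) acc = acc ++ pgTail n j := by
  intro m
  induction m with
  | zero => omega
  | succ m ih =>
    intro j acc hj hjm _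
    rw [PySem.List.pyRange_one_cons (by omega)]
    by_cases hm : m = 0
    · subst hm
      have hj' : j = n - 1 := by omega
      rw [pyRange_empty _ _ (by omega)]
      simp only [List.foldl_cons, List.foldl_nil, pgBody, hj']
      rw [if_neg (by simp; omega), if_pos (by simp)]
      apply String.toList_inj.mp
      rw [PySem.Str.slice_to_neg_one, pgTail_last n]
      simp
      exact dropLast_line _ _
    · have : (PySem.List.pyRange (j+1) n).foldl (pgBody n) (pgBody n acc j) = (pgBody n acc j) ++ pgTail n (j+1) :=
        ih (j+1) _ (by omega) (by omega) (by omega)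
      rw [List.foldl_cons, this]
      rw [pgTail_cons n j (by omega)]
      simp only [pgBody]
      rw [if_neg (by simp; omega), if_neg (by simp; omega)]
      apply String.toList_inj.mp
      simp

lemma pg_inner (nodes : List String) (acc : String) :
    (PySem.List.enumerate nodes).foldl (fun a (iv : Int × String) =>
      let idx := iv.1
      if idx == 0 then
        a ++ "  - " ++ PySem.Int.toStr idx ++ "@" ++ PySem.Int.toStr idx ++ "\n"
      else
        let a := a ++ "      - " ++ PySem.Int.toStr idx ++ "@" ++ PySem.Int.toStr idx ++ "\n"
        if idx == (nodes.length : Int) - 1 then PySem.Str.slice a none (some (-1))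
        else a) acc
    = acc ++ (if nodes.length = 0 then "" else "  - 0@0\n" ++ pgTail nodes.length 1) := by
  rw [PySem.List.enumerate_eq_map_pyRange nodes "", List.foldl_map]
  show (PySem.List.pyRange 0 (PySem.List.len nodes)).foldl (pgBody nodes.length) acc = _
  rw [show PySem.List.len nodes = (nodes.length : Int) from rfl]
  rcases Nat.eq_zero_or_pos nodes.length with h | h
  · rw [h]
    rw [pyRange_empty _ _ (by omega)]
    simp
  · rw [if_neg (by omega)]
    rw [PySem.List.pyRange_one_cons (by exact_mod_cast h)]
    rw [List.foldl_cons]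
    rw [show pgBody nodes.length acc 0 = acc ++ "  - 0@0\n" from by
      simp only [pgBody]; rw [if_pos (by simp)]
      apply String.toList_inj.mp; simp [PySem.Int.toStr, PySem.Int.toChars]]
    by_cases h1 : nodes.length = 1
    · rw [h1]
      rw [pyRange_empty _ _ (by omega)]
      apply String.toList_inj.mp
      simp [pgTail, PySem.Str.join, PySem.Chars.join, List.intercalate]
    · rw [show (0:Int)+1 = 1 from by norm_num]
      rw [pgTail_fold (nodes.length) (nodes.length - 1) 1 _ (by omega) (by omega) (by omega)]
      apply String.toList_inj.mp
      simp


-- ===== VERDICT (by name: the statement is the Claim_ definition above) =====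
set_option maxRecDepth 4096 in
theorem setPG_spec : Claim_equal_setPG := by
  intro nodes _
  unfold Spec_setPG setPG setPG_alt
  simp only [List.foldl_cons, List.foldl_nil, List.map_cons, List.map_nil, pg_inner, pgTail,
    PySem.Str.join, PySem.Chars.join_cons_cons, PySem.Chars.join_singleton]
  apply String.toList_inj.mp
  simp
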